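-- pv_equiv track=rewrite | github.com/tut-tuuut/advent-of-code-shiny-giggle | 2019/03.py | wire_length_to_point
-- ===== SOURCE A (Python) =====
-- def manhattan_distance(a, b):
--     xa, ya = a
--     xb, yb = b
--     return abs(xa - xb) + abs(ya - yb)
--
-- def is_point_on_segment(point, segment):
--     x, y = point
--     xa, ya, xb, yb = segment
--     if min(xa, xb) <= x <= max(xa, xb) and min(ya, yb) <= y <= max(ya, yb):
--         return True
--     return False
--
-- def segments(wire):
--     for i in range(len(wire) - 1):
--         yield wire[i] + wire[i + 1]
--
-- def wire_length_to_point(point, wire):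
--     length = 0
--     for segment in segments(wire):
--         xa, ya, xb, yb = segment
--         if is_point_on_segment(point, segment):
--             length += manhattan_distance((xa, ya), point)
--             return length
--         else:
--             length += manhattan_distance((xa, ya), (xb, yb))
-- ===== SOURCE B (Python) =====
-- def wire_length_to_point(point, wire):
--     x, y = point
--     # pass 1: index of the first segment whose bounding box contains the point
--     idx = None
--     for i in range(len(wire) - 1):
--         (xa, ya), (xb, yb) = wire[i], wire[i + 1]
--         if min(xa, xb) <= x <= max(xa, xb) and min(ya, yb) <= y <= max(ya, yb):
--             idx = i
--             break
--     if idx is None: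
--         return None
--     # pass 2: prefix sums of segment lengths up to that segment
--     prefix = [0]
--     for j in range(idx):
--         (xa, ya), (xb, yb) = wire[j], wire[j + 1]
--         prefix.append(prefix[-1] + abs(xa - xb) + abs(ya - yb))
--     xa, ya = wire[idx]
--     return prefix[-1] + abs(xa - x) + abs(ya - y)
-- ===== Notes on version B (the rewrite author's own statement) =====
-- stated objective: alternative
-- what changed: A fuses search and accumulation in one early-returning loop; B first scans for the index of the first bounding-box-containing segment, then builds a prefix-sum table of segment lengths and looks up the answer.
import Mathlib
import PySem

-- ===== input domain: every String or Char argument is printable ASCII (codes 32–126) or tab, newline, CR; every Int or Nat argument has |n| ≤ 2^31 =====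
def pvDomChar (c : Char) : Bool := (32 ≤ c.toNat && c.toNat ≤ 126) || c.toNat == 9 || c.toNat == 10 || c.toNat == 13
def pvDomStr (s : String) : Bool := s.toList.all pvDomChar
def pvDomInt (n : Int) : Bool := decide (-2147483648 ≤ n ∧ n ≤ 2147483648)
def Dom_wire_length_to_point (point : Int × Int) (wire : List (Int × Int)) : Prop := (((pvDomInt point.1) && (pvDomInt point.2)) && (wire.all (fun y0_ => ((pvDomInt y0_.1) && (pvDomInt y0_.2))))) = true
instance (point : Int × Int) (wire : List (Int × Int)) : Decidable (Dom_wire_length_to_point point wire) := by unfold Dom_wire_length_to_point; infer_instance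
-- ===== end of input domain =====

-- B rewrites A's fused early-returning loop as two passes: find the first matching segment index, then a prefix-sum of segment lengths (alternative decomposition, same O(n) cost).
-- ===== PORT A =====
def pvManhattan (a b : Int × Int) : Int :=
  |a.1 - b.1| + |a.2 - b.2|

def pvOnSeg (point a b : Int × Int) : Bool :=
  decide (min a.1 b.1 ≤ point.1 ∧ point.1 ≤ max a.1 b.1 ∧
          min a.2 b.2 ≤ point.2 ∧ point.2 ≤ max a.2 b.2)

-- the for-loop over segments(wire) with accumulator `length` and early return
def pvALoop (point : Int × Int) : List (Int × Int) → Int → Option Int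
  | a :: b :: rest, len =>
      if pvOnSeg point a b then some (len + pvManhattan a point)
      else pvALoop point (b :: rest) (len + pvManhattan a b)
  | _, _ => none

def wire_length_to_point (point : Int × Int) (wire : List (Int × Int)) : Option Int :=
  pvALoop point wire 0

-- ===== PORT B =====
-- pass 1: index of the first segment whose bounding box contains the point
def pvFindSeg (point : Int × Int) : List (Int × Int) → Option Nat
  | a :: b :: rest =>
      if pvOnSeg point a b then some 0
      else (pvFindSeg point (b :: rest)).map (· + 1)
  | _ => none

-- pass 2: prefix[-1] = sum of the lengths of segments j < k
def pvPrefSum : List (Int × Int) → Nat → Int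
  | a :: b :: rest, Nat.succ k => pvManhattan a b + pvPrefSum (b :: rest) k
  | _, _ => 0

def wire_length_to_point_alt (point : Int × Int) (wire : List (Int × Int)) : Option Int :=
  match pvFindSeg point wire with
  | none => none
  | some i =>
      -- wire[i]; i is always in range when pvFindSeg returns it, so getD is exact
      let v := wire.getD i (0, 0)
      some (pvPrefSum wire i + pvManhattan v point)

-- ===== PRECONDITION & SPEC =====
def Spec_wire_length_to_point (point : Int × Int) (wire : List (Int × Int)) (out : Option Int) : Prop := out = wire_length_to_point_alt point wire
instance (point : Int × Int) (wire : List (Int × Int)) (out : Option Int) : Decidable (Spec_wire_length_to_point point wire out) := by unfold Spec_wire_length_to_point; infer_instance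

-- ===== CLAIM (what is proved, stated in full; the proofs are below) =====
def Claim_equal_wire_length_to_point : Prop := ∀ (point : Int × Int) (wire : List (Int × Int)), Dom_wire_length_to_point point wire → Spec_wire_length_to_point point wire (wire_length_to_point point wire)


-- ===== LEMMAS AND PROOFS =====
theorem pvAlt_cons (p a b : Int × Int) (rest : List (Int × Int)) :
    wire_length_to_point_alt p (a :: b :: rest) =
      if pvOnSeg p a b then some (pvManhattan a p)
      else Option.map (fun v => pvManhattan a b + v) (wire_length_to_point_alt p (b :: rest)) := by
  unfold wire_length_to_point_alt
  by_cases h : pvOnSeg p a b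
  · simp [pvFindSeg, h, pvPrefSum]
  · simp only [pvFindSeg, h, Bool.false_eq_true, if_false]
    cases hf : pvFindSeg p (b :: rest) with
    | none => simp
    | some i => simp [pvPrefSum, add_assoc]

theorem pvLoop_eq (p : Int × Int) (wire : List (Int × Int)) (len : Int) :
    pvALoop p wire len = Option.map (fun v => len + v) (wire_length_to_point_alt p wire) := by
  induction wire generalizing len with
  | nil => simp [pvALoop, wire_length_to_point_alt, pvFindSeg]
  | cons a rest ih =>
    cases rest with
    | nil => simp [pvALoop, wire_length_to_point_alt, pvFindSeg]
    | cons b rest' =>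
      rw [pvAlt_cons]
      by_cases h : pvOnSeg p a b
      · simp [pvALoop, h]
      · rw [show pvALoop p (a :: b :: rest') len = pvALoop p (b :: rest') (len + pvManhattan a b) by
          simp [pvALoop, h]]
        rw [ih]
        cases wire_length_to_point_alt p (b :: rest') <;> simp [h, add_assoc]

-- ===== VERDICT (by name: the statement is the Claim_ definition above) =====
theorem wire_length_to_point_spec : Claim_equal_wire_length_to_point := by
  intro point wire _
  unfold Spec_wire_length_to_point wire_length_to_point
  rw [pvLoop_eq]
  cases wire_length_to_point_alt point wire <;> simp
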